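-- pv_equiv track=rewrite | github.com/chrisbduck/aoc | 2017/24/bridges.py | getLongestBridges
-- ===== SOURCE A (Python) =====
-- def getLongestBridges(components, port_map, next_port, components_so_far, in_use):
-- 	if next_port in port_map:
-- 		for index in port_map[next_port]:
-- 			if not in_use[index]:
-- 				in_use[index] = True
-- 				comp = components[index]
-- 				other_port = comp[1 if next_port == comp[0] else 0]
-- 				components_so_far.append(comp)
-- 				for bridge in getLongestBridges(components, port_map, other_port, components_so_far, in_use):
-- 					yield bridge
-- 				components_so_far.pop()
-- 				in_use[index] = False
--
-- 	yield list(components_so_far)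
-- ===== SOURCE B (Python) =====
-- # B: iterative generator that simulates A's recursion with an explicit stack of
-- # frames (port, remaining-indices list, index-that-led-here); same in-place
-- # mutation of components_so_far / in_use, same post-order yield sequence.
-- def getLongestBridges(components, port_map, next_port, components_so_far, in_use):
--     stack = [(next_port, list(port_map.get(next_port, ())), None)]
--     while stack:
--         port, todo, via = stack[-1]
--         if todo:
--             index = todo.pop(0)
--             if not in_use[index]:
--                 in_use[index] = True
--                 comp = components[index]
--                 other_port = comp[1 if port == comp[0] else 0]
--                 components_so_far.append(comp)
--                 stack.append((other_port, list(port_map.get(other_port, ())), index))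
--         else:
--             yield list(components_so_far)
--             stack.pop()
--             if via is not None:
--                 components_so_far.pop()
--                 in_use[via] = False
-- ===== Notes on version B (the rewrite author's own statement) =====
-- stated objective: alternative
-- what changed: A's recursive generator is replaced by an iterative generator that simulates the DFS with an explicit stack of (port, remaining-indices, via-index) frames, yielding a bridge whenever a frame's index list is exhausted and undoing the in-place marks on pop.
-- outside the precondition, e.g. on getLongestBridges([(1, 2)], {1: [0], 5: [7]}, 1, [], [False]): A returns [[(1, 2)], []], B returns [[(1, 2)], []]
import Mathlib
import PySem

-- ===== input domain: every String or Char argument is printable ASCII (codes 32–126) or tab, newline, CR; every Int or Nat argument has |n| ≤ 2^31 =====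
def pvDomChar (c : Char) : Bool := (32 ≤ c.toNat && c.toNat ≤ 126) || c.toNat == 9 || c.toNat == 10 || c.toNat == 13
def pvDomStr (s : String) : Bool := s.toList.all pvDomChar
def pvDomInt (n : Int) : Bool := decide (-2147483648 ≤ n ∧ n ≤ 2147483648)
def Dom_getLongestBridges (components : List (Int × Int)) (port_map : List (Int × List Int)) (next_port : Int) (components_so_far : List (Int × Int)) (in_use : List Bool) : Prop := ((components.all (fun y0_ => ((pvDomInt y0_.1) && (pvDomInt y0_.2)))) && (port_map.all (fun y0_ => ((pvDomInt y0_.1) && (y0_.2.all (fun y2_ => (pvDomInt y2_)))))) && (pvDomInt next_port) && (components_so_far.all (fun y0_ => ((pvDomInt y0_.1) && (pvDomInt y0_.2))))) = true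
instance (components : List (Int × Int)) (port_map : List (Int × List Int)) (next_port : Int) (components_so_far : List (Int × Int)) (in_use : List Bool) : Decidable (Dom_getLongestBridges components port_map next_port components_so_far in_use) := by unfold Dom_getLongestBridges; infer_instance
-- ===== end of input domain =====

-- B replaces A's recursive generator by an explicit-stack iterative generator (same yield order);
-- both Pythons mutate components_so_far/in_use in place and restore them, the theorems are about
-- the yielded sequence.

-- ===== PORT A =====
-- A is a recursive generator; the port threads the in-place state (in_use = used,
-- components_so_far = path) through the for-loop exactly as the Python mutates and
-- restores it.  'fuel' is a totality guard only: the recursion depth is bounded by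
-- the number of unused components, so fuel = in_use.count false + 1 is never
-- exhausted.  Where Python raises IndexError (out-of-range index, excluded by
-- Pre_) the pyGet? guard skips the iteration.
def stepF (c : List (Int × Int))
    (g : Int → List Bool → List (Int × Int) → List (List (Int × Int))) (p : Int)
    (acc : List (List (Int × Int)) × List Bool × List (Int × Int)) (idx : Int) :
    List (List (Int × Int)) × List Bool × List (Int × Int) :=
  if PySem.List.pyGet? acc.2.1 idx = some false then
    match PySem.List.pyGet? c idx with
    | some comp =>
      let used1 := PySem.List.pySetD acc.2.1 idx true
      let other := if p = comp.1 then comp.2 else comp.1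
      let path1 := acc.2.2 ++ [comp]
      (acc.1 ++ g other used1 path1, PySem.List.pySetD used1 idx false, path1.dropLast)
    | none => acc
  else acc

def goA (c : List (Int × Int)) (pm : List (Int × List Int)) :
    Nat → Int → List Bool → List (Int × Int) → List (List (Int × Int))
  | 0, _, _, path => [path]
  | fuel + 1, p, used, path =>
    match pm.lookup p with
    | some l =>
      let t := l.foldl (stepF c (goA c pm fuel) p) ([], used, path)
      t.1 ++ [t.2.2]
    | none => [path]

def getLongestBridges (components : List (Int × Int)) (port_map : List (Int × List Int)) (next_port : Int) (components_so_far : List (Int × Int)) (in_use : List Bool) : List (List (Int × Int)) :=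
  goA components port_map (in_use.count false + 1) next_port in_use components_so_far

-- ===== PORT B =====
-- Port of B: the explicit-stack machine.  A frame is (port, remaining index list,
-- Option of the index that led here); 'out' collects the yielded bridges.  'fuel'
-- is a totality guard only: pvPhi strictly decreases at every step, so the fuel
-- chosen in getLongestBridges_alt is never exhausted.
def pvPhi (b : Nat) : List (Int × List Int × Option Int) → Nat → Nat
  | [], _ => 0
  | (_, l, _) :: rest, e => l.length * b ^ e + 1 + pvPhi b rest (e + 1)

def mach (c : List (Int × Int)) (pm : List (Int × List Int)) :
    Nat → List (Int × List Int × Option Int) → List Bool → List (Int × Int) →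
    List (List (Int × Int)) → List (List (Int × Int))
  | 0, _, _, _, out => out
  | fuel + 1, stack, used, path, out =>
    match stack with
    | [] => out
    | (_, [], via) :: rest =>
      let out1 := out ++ [path]
      match via with
      | none => mach c pm fuel rest used path out1
      | some i => mach c pm fuel rest (PySem.List.pySetD used i false) path.dropLast out1
    | (p, idx :: todo, via) :: rest =>
      if PySem.List.pyGet? used idx = some false then
        match PySem.List.pyGet? c idx with
        | some comp =>
          let other := if p = comp.1 then comp.2 else comp.1
          mach c pm fuel
            ((other, (pm.lookup other).getD [], some idx) :: (p, todo, via) :: rest)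
            (PySem.List.pySetD used idx true) (path ++ [comp]) out
        | none => mach c pm fuel ((p, todo, via) :: rest) used path out
      else mach c pm fuel ((p, todo, via) :: rest) used path out

def getLongestBridges_alt (components : List (Int × Int)) (port_map : List (Int × List Int)) (next_port : Int) (components_so_far : List (Int × Int)) (in_use : List Bool) : List (List (Int × Int)) :=
  let stack0 : List (Int × List Int × Option Int) :=
    [(next_port, (port_map.lookup next_port).getD [], none)]
  mach components port_map
    (pvPhi ((port_map.map (fun kv => kv.2.length)).sum + 3) stack0 (in_use.count false) + 1)
    stack0 in_use components_so_far []

-- ===== PRECONDITION & SPEC =====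
-- Pre_ excludes inputs where the traversal reads in_use[i] or components[i] at an
-- out-of-range index i, on which Python raises IndexError.  Reachability of an
-- index is not closed-form, so Pre_ asks that either next_port is not a key of
-- port_map (then no index is ever read) or every listed index is in range for
-- both lists; this also excludes some inputs whose bad indices are never
-- reached, on which A and B return the same value (see the cite).
def Pre_getLongestBridges (components : List (Int × Int)) (port_map : List (Int × List Int)) (next_port : Int) (components_so_far : List (Int × Int)) (in_use : List Bool) : Prop :=
  (∀ kv ∈ port_map, kv.1 ≠ next_port) ∨
  (∀ kv ∈ port_map, ∀ i ∈ kv.2,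
    PySem.Raise.InRange components.length i ∧ PySem.Raise.InRange in_use.length i)
instance (components : List (Int × Int)) (port_map : List (Int × List Int)) (next_port : Int) (components_so_far : List (Int × Int)) (in_use : List Bool) : Decidable (Pre_getLongestBridges components port_map next_port components_so_far in_use) := by unfold Pre_getLongestBridges; infer_instance

def pvWitness_getLongestBridges : (List (Int × Int)) × (List (Int × List Int)) × Int × (List (Int × Int)) × List Bool :=
  ([(0, 1)], [(0, [0])], 0, [], [false])

def Spec_getLongestBridges (components : List (Int × Int)) (port_map : List (Int × List Int)) (next_port : Int) (components_so_far : List (Int × Int)) (in_use : List Bool) (out : List (List (Int × Int))) : Prop := out = getLongestBridges_alt components port_map next_port components_so_far in_use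
instance (components : List (Int × Int)) (port_map : List (Int × List Int)) (next_port : Int) (components_so_far : List (Int × Int)) (in_use : List Bool) (out : List (List (Int × Int))) : Decidable (Spec_getLongestBridges components port_map next_port components_so_far in_use out) := by unfold Spec_getLongestBridges; infer_instance

-- ===== CLAIM (what is proved, stated in full; the proofs are below) =====
def Claim_equal_getLongestBridges : Prop := ∀ (components : List (Int × Int)) (port_map : List (Int × List Int)) (next_port : Int) (components_so_far : List (Int × Int)) (in_use : List Bool), Dom_getLongestBridges components port_map next_port components_so_far in_use → Pre_getLongestBridges components port_map next_port components_so_far in_use → Spec_getLongestBridges components port_map next_port components_so_far in_use (getLongestBridges components port_map next_port components_so_far in_use)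

-- ===== LEMMAS AND PROOFS =====
theorem pvIdx_lt {n : Nat} {i : Int} {k : Nat}
    (h : PySem.List.pyIdx? n i = some k) : k < n := by
  unfold PySem.List.pyIdx? at h
  split_ifs at h <;> simp_all <;> omega

theorem pvCountSetTrue : ∀ (xs : List Bool) (k : Nat), xs[k]? = some false →
    (xs.set k true).count false + 1 = xs.count false := by
  intro xs
  induction xs with
  | nil => intro k h; simp at h
  | cons b tl ih =>
    intro k h
    cases k with
    | zero =>
      simp only [List.getElem?_cons_zero, Option.some_inj] at h
      subst h
      simp [List.count_cons]
    | succ m =>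
      simp only [List.getElem?_cons_succ] at h
      simp only [List.set_cons_succ, List.count_cons]
      have := ih m h
      omega

theorem pvCountSetFalseLe : ∀ (xs : List Bool) (k : Nat),
    (xs.set k false).count false ≤ xs.count false + 1 := by
  intro xs
  induction xs with
  | nil => intro k; simp
  | cons b tl ih =>
    intro k
    cases k with
    | zero =>
      simp only [List.set_cons_zero, List.count_cons]
      split <;> split <;> omega
    | succ m =>
      simp only [List.set_cons_succ, List.count_cons]
      have := ih m
      omega

theorem pvCountFalse_set_true {used : List Bool} {i : Int}
    (h : PySem.List.pyGet? used i = some false) :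
    (PySem.List.pySetD used i true).count false + 1 = used.count false := by
  unfold PySem.List.pyGet? at h
  cases hk : PySem.List.pyIdx? used.length i with
  | none => rw [hk] at h; simp at h
  | some k =>
    rw [hk] at h
    simp only [Option.bind_some] at h
    unfold PySem.List.pySetD PySem.List.pySet?
    rw [hk]
    simp only [Option.map_some, Option.getD_some]
    exact pvCountSetTrue used k h

theorem pvSetD_cancel {used : List Bool} {i : Int} {v b : Bool}
    (h : PySem.List.pyGet? used i = some v) :
    PySem.List.pySetD (PySem.List.pySetD used i b) i v = used := by
  unfold PySem.List.pyGet? at h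
  cases hk : PySem.List.pyIdx? used.length i with
  | none => rw [hk] at h; simp at h
  | some k =>
    rw [hk] at h
    simp only [Option.bind_some] at h
    unfold PySem.List.pySetD PySem.List.pySet?
    have hlen : (used.set k b).length = used.length := by simp
    rw [hk, Option.map_some, Option.getD_some, hlen, hk, Option.map_some, Option.getD_some,
      List.set_set]
    have hk' : k < used.length := pvIdx_lt hk
    have hv : used[k] = v := by
      have := List.getElem?_eq_getElem hk'
      rw [this] at h; exact (Option.some_inj.mp h)
    apply List.ext_getElem (by simp)
    intro j hj _
    by_cases hjk : j = k
    · subst hjk; simp [List.getElem_set, hv]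
    · rw [List.getElem_set]
      rw [if_neg (fun hh : k = j => hjk hh.symm)]

theorem pvCountFalse_setD_le (used : List Bool) (i : Int) :
    (PySem.List.pySetD used i false).count false ≤ used.count false + 1 := by
  unfold PySem.List.pySetD PySem.List.pySet?
  cases hk : PySem.List.pyIdx? used.length i with
  | none => simp
  | some k =>
    simp only [Option.map_some, Option.getD_some]
    exact pvCountSetFalseLe used k

theorem pvPhi_mono (b : Nat) (hb : 1 ≤ b) (s : List (Int × List Int × Option Int)) :
    ∀ {e e' : Nat}, e ≤ e' → pvPhi b s e ≤ pvPhi b s e' := by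
  induction s with
  | nil => intro e e' _; simp [pvPhi]
  | cons f rest ih =>
    intro e e' he
    obtain ⟨_, l, _⟩ := f
    simp only [pvPhi]
    have h1 : b ^ e ≤ b ^ e' := Nat.pow_le_pow_right hb he
    have h2 := ih (show e + 1 ≤ e' + 1 by omega)
    have h3 := Nat.mul_le_mul (le_refl l.length) h1
    omega

theorem pvLookup_len_le (pm : List (Int × List Int)) (q : Int) :
    ((pm.lookup q).getD []).length ≤ (pm.map (fun kv => kv.2.length)).sum := by
  induction pm with
  | nil => simp
  | cons kv rest ih =>
    obtain ⟨k, v⟩ := kv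
    simp only [List.lookup, List.map_cons, List.sum_cons]
    cases hq : q == k with
    | true => simp
    | false => simp; omega

-- the three pvPhi decreases of the machine's steps
theorem pvPhi_pop {b : Nat} (hb : 3 ≤ b) (p : Int) (via : Option Int)
    (rest : List (Int × List Int × Option Int)) (used used' : List Bool)
    (hvia : used'.count false ≤ used.count false + 1) :
    pvPhi b rest (used'.count false) < pvPhi b ((p, [], via) :: rest) (used.count false) := by
  simp only [pvPhi, List.length_nil, Nat.zero_mul]
  have := pvPhi_mono b (by omega) rest hvia
  omega

theorem pvPhi_skip {b : Nat} (hb : 3 ≤ b) (p idx : Int) (todo : List Int) (via : Option Int)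
    (rest : List (Int × List Int × Option Int)) (c : Nat) :
    pvPhi b ((p, todo, via) :: rest) c < pvPhi b ((p, idx :: todo, via) :: rest) c := by
  simp only [pvPhi, List.length_cons, Nat.add_mul, Nat.one_mul]
  have hpow : 1 ≤ b ^ c := Nat.one_le_pow _ _ (by omega)
  omega

theorem pvPhi_push {b : Nat} (hb : 3 ≤ b) (q p idx : Int) (lq todo : List Int)
    (via : Option Int) (rest : List (Int × List Int × Option Int)) (c1 : Nat)
    (hK : lq.length ≤ b - 3) :
    pvPhi b ((q, lq, some idx) :: (p, todo, via) :: rest) c1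
      < pvPhi b ((p, idx :: todo, via) :: rest) (c1 + 1) := by
  simp only [pvPhi, List.length_cons, Nat.add_mul, Nat.one_mul]
  have he : 1 ≤ b ^ c1 := Nat.one_le_pow _ _ (by omega)
  have key : lq.length * b ^ c1 + 1 < b ^ (c1 + 1) := by
    have h1 : lq.length * b ^ c1 ≤ (b - 3) * b ^ c1 := Nat.mul_le_mul_right _ hK
    have h2 : (b - 2) * b ^ c1 = (b - 3) * b ^ c1 + b ^ c1 := by
      have hb2 : b - 2 = (b - 3) + 1 := by omega
      rw [hb2, Nat.add_mul, Nat.one_mul]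
    have h3 : (b - 2) * b ^ c1 < b * b ^ c1 :=
      (Nat.mul_lt_mul_right (show 0 < b ^ c1 by omega)).mpr (by omega)
    have h4 : b * b ^ c1 = b ^ (c1 + 1) := by rw [pow_succ, Nat.mul_comm]
    omega
  omega

-- what a pop does to the machine state (none = root frame)
def popU (via : Option Int) (used : List Bool) : List Bool :=
  match via with | none => used | some i => PySem.List.pySetD used i false
def popP (via : Option Int) (path : List (Int × Int)) : List (Int × Int) :=
  match via with | none => path | some _ => path.dropLast

-- the results of A's for-loop as a function of the (restored) entry state
def resF (c : List (Int × Int))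
    (g : Int → List Bool → List (Int × Int) → List (List (Int × Int))) (p : Int) :
    List Int → List Bool → List (Int × Int) → List (List (Int × Int))
  | [], _, _ => []
  | idx :: rest, used, path =>
    if PySem.List.pyGet? used idx = some false then
      match PySem.List.pyGet? c idx with
      | some comp =>
        g (if p = comp.1 then comp.2 else comp.1) (PySem.List.pySetD used idx true)
            (path ++ [comp]) ++ resF c g p rest used path
      | none => resF c g p rest used path
    else resF c g p rest used path

theorem foldl_stepF_eq (c : List (Int × Int))
    (g : Int → List Bool → List (Int × Int) → List (List (Int × Int))) (p : Int) :
    ∀ (l : List Int) (res : List (List (Int × Int))) (used : List Bool)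
      (path : List (Int × Int)),
      l.foldl (stepF c g p) (res, used, path) = (res ++ resF c g p l used path, used, path) := by
  intro l
  induction l with
  | nil => intro res used path; simp [resF]
  | cons idx rest ih =>
    intro res used path
    rw [List.foldl_cons]
    by_cases h : PySem.List.pyGet? used idx = some false
    · cases hc : PySem.List.pyGet? c idx with
      | none =>
        rw [show stepF c g p (res, used, path) idx = (res, used, path) by
          simp [stepF, h, hc]]
        rw [ih, resF, if_pos h, hc]
      | some comp =>
        rw [show stepF c g p (res, used, path) idx =
            (res ++ g (if p = comp.1 then comp.2 else comp.1)
                (PySem.List.pySetD used idx true) (path ++ [comp]),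
              PySem.List.pySetD (PySem.List.pySetD used idx true) idx false,
              (path ++ [comp]).dropLast) by simp [stepF, h, hc]]
        rw [pvSetD_cancel h, List.dropLast_concat, ih, resF, if_pos h, hc]
        simp
    · rw [show stepF c g p (res, used, path) idx = (res, used, path) by simp [stepF, h]]
      rw [ih, resF, if_neg h]

theorem goA_succ (c : List (Int × Int)) (pm : List (Int × List Int)) (fuel : Nat) (p : Int)
    (used : List Bool) (path : List (Int × Int)) :
    goA c pm (fuel + 1) p used path =
      match pm.lookup p with
      | some l => resF c (goA c pm fuel) p l used path ++ [path]
      | none => [path] := by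
  rw [goA]
  cases hq : pm.lookup p with
  | none => rfl
  | some l => simp [foldl_stepF_eq]

theorem resF_congr (c : List (Int × Int)) (p : Int) :
    ∀ (l : List Int) (used : List Bool) (path : List (Int × Int))
      (g1 g2 : Int → List Bool → List (Int × Int) → List (List (Int × Int))),
      (∀ q u pa, u.count false + 1 = used.count false → g1 q u pa = g2 q u pa) →
      resF c g1 p l used path = resF c g2 p l used path := by
  intro l
  induction l with
  | nil => intro used path g1 g2 _; simp [resF]
  | cons idx rest ih =>
    intro used path g1 g2 hg
    rw [resF, resF]
    by_cases h : PySem.List.pyGet? used idx = some false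
    · rw [if_pos h, if_pos h]
      cases hc : PySem.List.pyGet? c idx with
      | none => exact ih used path g1 g2 hg
      | some comp =>
        simp only [hg _ _ _ (pvCountFalse_set_true h), ih used path g1 g2 hg]
    · rw [if_neg h, if_neg h]
      exact ih used path g1 g2 hg

-- the canonical A-side value: A with its exact fuel
def gC (c : List (Int × Int)) (pm : List (Int × List Int)) (q : Int) (u : List Bool)
    (pa : List (Int × Int)) : List (List (Int × Int)) :=
  goA c pm (u.count false + 1) q u pa

theorem gC_unfold (c : List (Int × Int)) (pm : List (Int × List Int)) (q : Int)
    (u : List Bool) (pa : List (Int × Int)) :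
    gC c pm q u pa =
      match pm.lookup q with
      | some l => resF c (gC c pm) q l u pa ++ [pa]
      | none => [pa] := by
  unfold gC
  rw [goA_succ]
  cases hq : pm.lookup q with
  | none => rfl
  | some l =>
    simp only
    congr 1
    apply resF_congr
    intro q' u' pa' hu
    show goA c pm (u.count false) q' u' pa' = goA c pm (u'.count false + 1) q' u' pa'
    rw [← hu]

theorem mach_irrel (c : List (Int × Int)) (pm : List (Int × List Int)) {b : Nat}
    (hb : b = (pm.map (fun kv => kv.2.length)).sum + 3) :
    ∀ (f : Nat), ∀ (g : Nat) (stack : List (Int × List Int × Option Int))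
      (used : List Bool) (path : List (Int × Int)) (out : List (List (Int × Int))),
      pvPhi b stack (used.count false) < f → pvPhi b stack (used.count false) < g →
      mach c pm f stack used path out = mach c pm g stack used path out := by
  intro f
  induction f using Nat.strong_induction_on with
  | _ f ihf =>
    intro g stack used path out hf hg
    obtain ⟨f0, rfl⟩ : ∃ f0, f = f0 + 1 := ⟨f - 1, by omega⟩
    obtain ⟨g0, rfl⟩ : ∃ g0, g = g0 + 1 := ⟨g - 1, by omega⟩
    match stack with
    | [] => rw [mach, mach]
    | (p, [], via) :: rest =>
      have hstep : ∀ u' : List Bool, u'.count false ≤ used.count false + 1 →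
          mach c pm f0 rest u' (popP via path) (out ++ [path]) =
          mach c pm g0 rest u' (popP via path) (out ++ [path]) := by
        intro u' hu
        have hd := pvPhi_pop (b := b) (by omega) p via rest used u' hu
        exact ihf f0 (by omega) g0 rest u' (popP via path) (out ++ [path])
          (by omega) (by omega)
      cases via with
      | none => rw [mach, mach]; exact hstep used (by omega)
      | some i =>
        rw [mach, mach]
        exact hstep (PySem.List.pySetD used i false) (pvCountFalse_setD_le used i)
    | (p, idx :: todo, via) :: rest =>
      rw [mach, mach]
      by_cases h : PySem.List.pyGet? used idx = some false
      · rw [if_pos h, if_pos h]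
        cases hc : PySem.List.pyGet? c idx with
        | none =>
          have hd := pvPhi_skip (b := b) (by omega) p idx todo via rest (used.count false)
          exact ihf f0 (by omega) g0 _ used path out (by omega) (by omega)
        | some comp =>
          simp only
          have hc1 := pvCountFalse_set_true h
          have hK : ((pm.lookup (if p = comp.1 then comp.2 else comp.1)).getD []).length
              ≤ b - 3 := by
            have := pvLookup_len_le pm (if p = comp.1 then comp.2 else comp.1)
            omega
          have hd := pvPhi_push (b := b) (by omega)
            (if p = comp.1 then comp.2 else comp.1) p idx
            ((pm.lookup (if p = comp.1 then comp.2 else comp.1)).getD []) todo via rest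
            ((PySem.List.pySetD used idx true).count false) hK
          rw [hc1] at hd
          exact ihf f0 (by omega) g0 _ _ _ out (by omega) (by omega)
      · rw [if_neg h, if_neg h]
        have hd := pvPhi_skip (b := b) (by omega) p idx todo via rest (used.count false)
        exact ihf f0 (by omega) g0 _ used path out (by omega) (by omega)

theorem sim (c : List (Int × Int)) (pm : List (Int × List Int)) {b : Nat}
    (hb : b = (pm.map (fun kv => kv.2.length)).sum + 3) :
    ∀ (f : Nat), ∀ (l : List Int) (p : Int) (via : Option Int)
      (rest : List (Int × List Int × Option Int)) (used : List Bool)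
      (path : List (Int × Int)) (out : List (List (Int × Int))),
      pvPhi b ((p, l, via) :: rest) (used.count false) < f →
      mach c pm f ((p, l, via) :: rest) used path out =
        mach c pm (pvPhi b rest ((popU via used).count false) + 1) rest
          (popU via used) (popP via path)
          (out ++ resF c (gC c pm) p l used path ++ [path]) := by
  intro f
  induction f using Nat.strong_induction_on with
  | _ f ihf =>
    intro l p via rest used path out hf
    obtain ⟨f0, rfl⟩ : ∃ f0, f = f0 + 1 := ⟨f - 1, by omega⟩
    match l with
    | [] =>
      have hu : (popU via used).count false ≤ used.count false + 1 := by
        cases via with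
        | none => simp [popU]
        | some i => exact pvCountFalse_setD_le used i
      have hd := pvPhi_pop (b := b) (by omega) p via rest used (popU via used) hu
      have hirr := mach_irrel c pm hb f0 (pvPhi b rest ((popU via used).count false) + 1)
        rest (popU via used) (popP via path) (out ++ [path]) (by omega) (by omega)
      cases via with
      | none =>
        rw [mach]
        simpa [popU, popP, resF] using hirr
      | some i =>
        rw [mach]
        simpa [popU, popP, resF] using hirr
    | idx :: todo =>
      rw [mach]
      by_cases h : PySem.List.pyGet? used idx = some false
      · rw [if_pos h]
        cases hc : PySem.List.pyGet? c idx with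
        | none =>
          have hd := pvPhi_skip (b := b) (by omega) p idx todo via rest (used.count false)
          rw [ihf f0 (by omega) todo p via rest used path out (by omega)]
          rw [resF, if_pos h, hc]
        | some comp =>
          simp only
          have hc1 := pvCountFalse_set_true h
          have hK : ((pm.lookup (if p = comp.1 then comp.2 else comp.1)).getD []).length
              ≤ b - 3 := by
            have := pvLookup_len_le pm (if p = comp.1 then comp.2 else comp.1)
            omega
          have hd := pvPhi_push (b := b) (by omega)
            (if p = comp.1 then comp.2 else comp.1) p idx
            ((pm.lookup (if p = comp.1 then comp.2 else comp.1)).getD []) todo via rest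
            ((PySem.List.pySetD used idx true).count false) hK
          rw [hc1] at hd
          -- child frame
          rw [ihf f0 (by omega) _ _ _ _ _ _ _ (by omega)]
          simp only [popU, popP]
          rw [pvSetD_cancel h, List.dropLast_concat]
          -- back on the current frame, with canonical fuel
          have hd2 := pvPhi_skip (b := b) (by omega) p idx todo via rest (used.count false)
          rw [ihf (pvPhi b ((p, todo, via) :: rest) (used.count false) + 1)
            (by omega) todo p via rest used path _ (by omega)]
          congr 1
          rw [resF, if_pos h, hc]
          have hchild :
              resF c (gC c pm) (if p = comp.1 then comp.2 else comp.1)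
                  ((pm.lookup (if p = comp.1 then comp.2 else comp.1)).getD [])
                  (PySem.List.pySetD used idx true) (path ++ [comp]) ++ [path ++ [comp]] =
              gC c pm (if p = comp.1 then comp.2 else comp.1)
                  (PySem.List.pySetD used idx true) (path ++ [comp]) := by
            rw [gC_unfold]
            cases hq : pm.lookup (if p = comp.1 then comp.2 else comp.1) with
            | none => simp [hq, resF]
            | some lq => simp [hq]
          simp [← hchild, List.append_assoc]
      · rw [if_neg h]
        have hd := pvPhi_skip (b := b) (by omega) p idx todo via rest (used.count false)
        rw [ihf f0 (by omega) todo p via rest used path out (by omega)]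
        rw [resF, if_neg h]

-- ===== VERDICT (by name: the statement is the Claim_ definition above) =====
theorem getLongestBridges_spec : Claim_equal_getLongestBridges := by
  intro components port_map next_port components_so_far in_use _ _
  unfold Spec_getLongestBridges getLongestBridges getLongestBridges_alt
  rw [sim components port_map rfl _ _ _ _ _ _ _ _ (by omega)]
  simp only [popU, popP]
  rw [show pvPhi ((port_map.map (fun kv => kv.2.length)).sum + 3) [] (in_use.count false) + 1
      = 0 + 1 by rfl]
  rw [mach]
  rw [show goA components port_map (in_use.count false + 1) next_port in_use components_so_far
      = gC components port_map next_port in_use components_so_far from rfl, gC_unfold]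
  cases hq : port_map.lookup next_port with
  | none => simp [hq, resF]
  | some lq => simp [hq]
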